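-- pv_equiv track=rewrite | github.com/asmeyatsky/agentmesh | agentmesh-eda/agentmesh/domain/services/agent_collaboration_service.py | _simple_allocation
-- ===== SOURCE A (Python) =====
-- from typing import List, Dict, Optional, Tuple, Set
--
-- def _simple_allocation(
--                       resource_needs: Dict[str, Dict],
--                       available: Dict) -> Optional[Dict[str, Dict]]:
--     """
--     Try simple allocation without negotiation.
--
--     Returns allocation if possible, None if resources insufficient.
--     """
--     total_needs = {}
--     for agent_needs in resource_needs.values():
--         for resource, amount in agent_needs.items():
--             total_needs[resource] = total_needs.get(resource, 0) + amount
--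
--     # Check if we have enough
--     for resource, amount in total_needs.items():
--         if amount > available.get(resource, 0):
--             return None
--
--     # Allocation succeeds
--     return resource_needs
-- ===== SOURCE B (Python) =====
-- from typing import List, Dict, Optional, Tuple, Set
--
-- def _simple_allocation(resource_needs, available):
--     """
--     Try simple allocation without negotiation.
--
--     Returns allocation if possible, None if resources insufficient.
--     """
--     # No aggregation table: flatten every (resource, amount) pair, sort by
--     # resource so equal resources are adjacent, then one grouped scan sums
--     # each run and compares it to availability.
--     pairs = sorted(((r, a) for needs in resource_needs.values()
--                     for r, a in needs.items()), key=lambda p: p[0])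
--     i, n = 0, len(pairs)
--     while i < n:
--         r = pairs[i][0]
--         total = pairs[i][1]
--         i += 1
--         while i < n and pairs[i][0] == r:
--             total += pairs[i][1]
--             i += 1
--         if total > available.get(r, 0):
--             return None
--     return resource_needs
-- ===== Notes on version B (the rewrite author's own statement) =====
-- stated objective: alternative
-- what changed: A aggregates demand per resource in a hash table during one nested pass and then compares each total to availability; B uses no table at all: it flattens the needs into a (resource, amount) pair list, sorts it by resource, and does one grouped scan that sums each adjacent run and compares it to availability.
import Mathlib
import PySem

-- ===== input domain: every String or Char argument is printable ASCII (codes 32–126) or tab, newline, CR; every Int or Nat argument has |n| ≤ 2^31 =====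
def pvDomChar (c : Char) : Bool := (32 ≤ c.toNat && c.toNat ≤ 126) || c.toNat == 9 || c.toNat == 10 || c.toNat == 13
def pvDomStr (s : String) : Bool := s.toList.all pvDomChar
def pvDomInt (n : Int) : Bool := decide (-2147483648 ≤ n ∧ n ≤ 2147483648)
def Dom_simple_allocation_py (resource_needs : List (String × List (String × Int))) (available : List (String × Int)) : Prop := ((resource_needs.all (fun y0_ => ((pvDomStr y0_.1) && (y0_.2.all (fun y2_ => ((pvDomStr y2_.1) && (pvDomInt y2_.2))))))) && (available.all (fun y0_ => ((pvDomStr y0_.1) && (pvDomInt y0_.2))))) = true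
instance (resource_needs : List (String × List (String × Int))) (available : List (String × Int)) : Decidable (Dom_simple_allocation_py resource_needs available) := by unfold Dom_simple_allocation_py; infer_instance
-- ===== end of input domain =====

-- B drops A's hash-table aggregation entirely: it flattens the needs into a pair
-- list, sorts it by resource, and sums/checks each adjacent run in one grouped scan.

-- shared helper: Python's available.get(resource, 0) on the association list (first match)
def pvAvailGet (available : List (String × Int)) (r : String) : Int :=
  ((available.find? (fun p => p.1 == r)).map (·.2)).getD 0

-- ===== PORT A =====
def simple_allocation_py (resource_needs : List (String × List (String × Int))) (available : List (String × Int)) : Option (List (String × List (String × Int))) :=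
  let total_needs : PySem.Dict String Int :=
    resource_needs.foldl (fun acc agent_needs =>
      agent_needs.2.foldl (fun acc p => acc.insert p.1 (acc.getD p.1 0 + p.2)) acc)
      PySem.Dict.empty
  if total_needs.items.any (fun p => p.2 > pvAvailGet available p.1) then none
  else some resource_needs

-- ===== PORT B =====
-- the outer while loop of Source B: consume one run of equal resources, sum it, test it
def pvScan (available : List (String × Int)) : List (String × Int) → Bool
  | [] => false
  | p :: rest =>
      let total := (rest.takeWhile (fun q => q.1 == p.1)).foldl (fun s q => s + q.2) p.2
      if total > pvAvailGet available p.1 then true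
      else pvScan available (rest.dropWhile (fun q => q.1 == p.1))
termination_by l => l.length
decreasing_by simpa using Nat.lt_succ_of_le (List.length_dropWhile_le _ _)

def simple_allocation_py_alt (resource_needs : List (String × List (String × Int))) (available : List (String × Int)) : Option (List (String × List (String × Int))) :=
  let pairs : List (String × Int) :=
    PySem.List.sorted (resource_needs.flatMap (·.2)) (fun p => p.1) false
  if pvScan available pairs then none
  else some resource_needs

-- ===== PRECONDITION & SPEC =====
def Spec_simple_allocation_py (resource_needs : List (String × List (String × Int))) (available : List (String × Int)) (out : Option (List (String × List (String × Int)))) : Prop := out = simple_allocation_py_alt resource_needs available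
instance (resource_needs : List (String × List (String × Int))) (available : List (String × Int)) (out : Option (List (String × List (String × Int)))) : Decidable (Spec_simple_allocation_py resource_needs available out) := by unfold Spec_simple_allocation_py; infer_instance

-- ===== CLAIM (what is proved, stated in full; the proofs are below) =====
def Claim_equal_simple_allocation_py : Prop := ∀ (resource_needs : List (String × List (String × Int))) (available : List (String × Int)), Dom_simple_allocation_py resource_needs available → Spec_simple_allocation_py resource_needs available (simple_allocation_py resource_needs available)

-- ===== LEMMAS AND PROOFS =====

-- proof-only abbreviations for the three accumulations
def pvSumFor (ps : List (String × Int)) (r : String) : Int :=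
  (ps.filter (fun p => p.1 == r)).foldl (fun s p => s + p.2) 0

def pvSeen (ps : List (String × Int)) : List String :=
  ps.foldl (fun acc p => if acc.contains p.1 then acc else acc ++ [p.1]) []

def pvTot (ps : List (String × Int)) : PySem.Dict String Int :=
  ps.foldl (fun acc p => acc.insert p.1 (acc.getD p.1 0 + p.2)) PySem.Dict.empty

-- nested loop = loop over the flattened list of (resource, amount) pairs
theorem pv_nested_foldl {σ : Type} (l : List (String × List (String × Int))) (f : σ → (String × Int) → σ) (init : σ) :
    l.foldl (fun acc ag => ag.2.foldl f acc) init = (l.flatMap (·.2)).foldl f init := by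
  induction l generalizing init with
  | nil => rfl
  | cons h t ih => simp [List.foldl_append, ih]

theorem pv_sumFor_append (l : List (String × Int)) (q : String × Int) (r : String) :
    pvSumFor (l ++ [q]) r = pvSumFor l r + (if q.1 == r then q.2 else 0) := by
  unfold pvSumFor
  rw [List.filter_append]
  by_cases h : (q.1 == r) = true
  · simp [List.filter, h, List.foldl_append]
  · simp [List.filter, h]

theorem pv_mem_seen_aux (ps : List (String × Int)) (acc : List String) (x : String) :
    x ∈ ps.foldl (fun acc p => if acc.contains p.1 then acc else acc ++ [p.1]) acc
      ↔ x ∈ acc ∨ x ∈ ps.map (·.1) := by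
  induction ps generalizing acc with
  | nil => simp
  | cons p t ih =>
    simp only [List.foldl_cons, ih, List.map_cons, List.mem_cons]
    by_cases h : acc.contains p.1 = true
    · have hp : p.1 ∈ acc := by simpa using h
      rw [if_pos h]
      constructor
      · rintro (h1 | h2)
        · exact Or.inl h1
        · exact Or.inr (Or.inr h2)
      · rintro (h1 | h2 | h3)
        · exact Or.inl h1
        · exact Or.inl (h2 ▸ hp)
        · exact Or.inr h3
    · rw [if_neg h]
      simp only [List.mem_append, List.mem_singleton]
      tauto

theorem pv_mem_seen (ps : List (String × Int)) (x : String) :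
    x ∈ pvSeen ps ↔ x ∈ ps.map (·.1) := by
  unfold pvSeen; rw [pv_mem_seen_aux]; simp

theorem pv_sumFor_of_not_key (l : List (String × Int)) (r : String)
    (h : r ∉ l.map (·.1)) : pvSumFor l r = 0 := by
  unfold pvSumFor
  have : l.filter (fun p => p.1 == r) = [] := by
    rw [List.filter_eq_nil_iff]
    intro p hp hbeq
    exact h (List.mem_map.mpr ⟨p, hp, eq_of_beq hbeq⟩)
  rw [this]; rfl

theorem pv_get?_keyed (g : String → Int) (l : List String) (k : String) :
    (PySem.Dict.mk (l.map (fun r => (r, g r)))).get? k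
      = if l.contains k then some (g k) else none := by
  induction l with
  | nil => simp [PySem.Dict.get?]
  | cons r t ih =>
    simp only [List.map_cons]
    rw [PySem.Dict.get?_mk_cons]
    by_cases h : r = k
    · subst h; simp
    · have hb : (r == k) = false := beq_eq_false_iff_ne.mpr h
      have hb2 : (k == r) = false := beq_eq_false_iff_ne.mpr (Ne.symm h)
      rw [hb]
      simp only [Bool.false_eq_true, if_false, ih]
      rw [List.contains_cons, hb2]
      simp

-- the core invariant: A's totals dict IS B's per-resource rescan, in seen order
theorem pv_items_tot (ps : List (String × Int)) :
    (pvTot ps).items = (pvSeen ps).map (fun r => (r, pvSumFor ps r)) := by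
  induction ps using List.reverseRecOn with
  | nil => rfl
  | append_singleton l q ih =>
    have htot : pvTot (l ++ [q]) = (pvTot l).insert q.1 ((pvTot l).getD q.1 0 + q.2) := by
      unfold pvTot; rw [List.foldl_append]; rfl
    have hseen : pvSeen (l ++ [q])
        = if (pvSeen l).contains q.1 then pvSeen l else pvSeen l ++ [q.1] := by
      unfold pvSeen; rw [List.foldl_append]; rfl
    have hTmk : pvTot l = PySem.Dict.mk ((pvSeen l).map (fun r => (r, pvSumFor l r))) := by
      apply PySem.Dict.ext; exact ih
    have hget : (pvTot l).get? q.1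
        = if (pvSeen l).contains q.1 then some (pvSumFor l q.1) else none := by
      rw [hTmk, pv_get?_keyed]
    have hcont : (pvTot l).contains q.1 = (pvSeen l).contains q.1 := by
      rw [PySem.Dict.contains_eq_isSome_get? (d := pvTot l) (k := q.1), hget]
      cases hc : (pvSeen l).contains q.1
      · rw [if_neg (by simp)]; rfl
      · rw [if_pos rfl]; rfl
    by_cases hc : (pvSeen l).contains q.1 = true
    · -- q.1 already seen: insert updates in place, seen unchanged
      have hgd : (pvTot l).getD q.1 0 = pvSumFor l q.1 := by
        rw [PySem.Dict.getD_eq_get?_getD, hget, if_pos hc]; rfl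
      rw [htot, PySem.Dict.items_insert, hcont, hc, if_pos rfl, hseen, hc, if_pos rfl,
        ih, List.map_map, hgd]
      apply List.map_congr_left
      intro r _
      simp only [Function.comp]
      by_cases hr : r = q.1
      · subst hr
        rw [if_pos (by simp), pv_sumFor_append]
        simp
      · rw [if_neg (by simp [hr]), pv_sumFor_append]
        have hqr : (q.1 == r) = false := beq_eq_false_iff_ne.mpr (Ne.symm hr)
        rw [hqr]
        simp
    · -- q.1 fresh: appended to both items and seen
      have hc' : (pvSeen l).contains q.1 = false := by simpa using hc
      have hns : q.1 ∉ pvSeen l := by simpa using hc'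
      have hnk : q.1 ∉ l.map (·.1) := fun hmem => hns ((pv_mem_seen l q.1).mpr hmem)
      have hgd : (pvTot l).getD q.1 0 = 0 := by
        apply PySem.Dict.getD_of_not_contains
        rw [hcont]; exact hc'
      rw [htot, PySem.Dict.items_insert, hcont, hc', if_neg (by simp), hseen, hc',
        if_neg (by simp), ih, List.map_append, hgd]
      congr 1
      · apply List.map_congr_left
        intro r hr
        have hrq : (q.1 == r) = false :=
          beq_eq_false_iff_ne.mpr (fun he => hns (he ▸ hr))
        rw [pv_sumFor_append, hrq]
        simp
      · have h0 : pvSumFor l q.1 = 0 := pv_sumFor_of_not_key l q.1 hnk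
        simp [pv_sumFor_append, h0]

-- ===== VERDICT (by name: the statement is the Claim_ definition above) =====
-- B-side lemmas: grouped scan over a key-sorted list checks exactly the per-key sums

theorem pv_foldl_shift (l : List (String × Int)) (c : Int) :
    l.foldl (fun s q => s + q.2) c = c + l.foldl (fun s q => s + q.2) 0 := by
  induction l generalizing c with
  | nil => simp
  | cons q t ih =>
    simp only [List.foldl_cons]
    rw [ih (c + q.2), ih (0 + q.2)]
    ring

theorem pv_sumFor_eq_sum (l : List (String × Int)) (r : String) :
    pvSumFor l r = ((l.filter (fun p => p.1 == r)).map (·.2)).sum := by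
  unfold pvSumFor
  generalize l.filter (fun p => p.1 == r) = m
  induction m with
  | nil => simp
  | cons q t ih =>
    simp only [List.foldl_cons, List.map_cons, List.sum_cons]
    rw [pv_foldl_shift, ih]
    ring

theorem pv_sumFor_perm (l1 l2 : List (String × Int)) (h : l1.Perm l2) (r : String) :
    pvSumFor l1 r = pvSumFor l2 r := by
  rw [pv_sumFor_eq_sum, pv_sumFor_eq_sum]
  exact ((h.filter _).map _).sum_eq

theorem pv_sumFor_append' (l1 l2 : List (String × Int)) (r : String) :
    pvSumFor (l1 ++ l2) r = pvSumFor l1 r + pvSumFor l2 r := by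
  simp [pv_sumFor_eq_sum, List.filter_append]

theorem pv_sumFor_cons_ne (p : String × Int) (l : List (String × Int)) (r : String)
    (h : (p.1 == r) = false) : pvSumFor (p :: l) r = pvSumFor l r := by
  unfold pvSumFor
  rw [List.filter_cons_of_neg (by simp [h])]

theorem pv_sumFor_cons_self (p : String × Int) (l : List (String × Int)) :
    pvSumFor (p :: l) p.1 = p.2 + pvSumFor l p.1 := by
  unfold pvSumFor
  rw [List.filter_cons_of_pos (by simp)]
  simp only [List.foldl_cons]
  rw [pv_foldl_shift]
  ring

-- after dropping the leading run of key r0, no element of a key-sorted list has key r0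
theorem pv_drop_ne (r0 : String) (l : List (String × Int))
    (hord : l.Pairwise (fun a b => a.1 ≤ b.1)) (hlb : ∀ x ∈ l, r0 ≤ x.1) :
    ∀ q ∈ l.dropWhile (fun q => q.1 == r0), q.1 ≠ r0 := by
  induction l with
  | nil => simp
  | cons b t ih =>
    rw [List.dropWhile_cons]
    by_cases hb : (b.1 == r0) = true
    · rw [if_pos hb]
      exact ih (List.pairwise_cons.mp hord).2 (fun x hx => hlb x (List.mem_cons_of_mem b hx))
    · rw [if_neg hb]
      intro q hq
      have hbne : b.1 ≠ r0 := fun he => hb (by simp [he])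
      have hblt : r0 < b.1 :=
        lt_of_le_of_ne (hlb b (List.mem_cons_self)) (Ne.symm hbne)
      rcases List.mem_cons.mp hq with h1 | h2
      · rw [h1]; exact hbne
      · have : b.1 ≤ q.1 := (List.pairwise_cons.mp hord).1 q h2
        exact fun he => absurd (he ▸ this) (not_le.mpr hblt)

theorem pv_sumFor_zero_of_all_ne (l : List (String × Int)) (r : String)
    (h : ∀ q ∈ l, q.1 ≠ r) : pvSumFor l r = 0 := by
  apply pv_sumFor_of_not_key
  intro hm
  rcases List.mem_map.mp hm with ⟨q, hq, he⟩
  exact h q hq he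

-- the grouped scan on a key-sorted list = the per-key sum check
theorem pv_scan_any (av : List (String × Int)) :
    ∀ (n : Nat) (ps : List (String × Int)), ps.length ≤ n →
    ps.Pairwise (fun a b => a.1 ≤ b.1) →
    (pvScan av ps = true ↔ ∃ r ∈ ps.map (·.1), pvSumFor ps r > pvAvailGet av r) := by
  intro n
  induction n with
  | zero =>
    intro ps hlen _
    have : ps = [] := List.eq_nil_of_length_eq_zero (Nat.le_zero.mp hlen)
    subst this
    simp [pvScan]
  | succ n ih =>
    intro ps hlen hord
    match ps with
    | [] => simp [pvScan]
    | p :: rest =>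
      have hhead : ∀ b ∈ rest, p.1 ≤ b.1 := (List.pairwise_cons.mp hord).1
      have htail : rest.Pairwise (fun a b => a.1 ≤ b.1) := (List.pairwise_cons.mp hord).2
      set run := rest.takeWhile (fun q => q.1 == p.1) with hrun
      set rest' := rest.dropWhile (fun q => q.1 == p.1) with hrest'
      have hsplit : rest = run ++ rest' := (List.takeWhile_append_dropWhile).symm
      have hrunkey : ∀ q ∈ run, (q.1 == p.1) = true := by
        intro q hq
        rw [hrun] at hq
        simpa using List.mem_takeWhile_imp (p := fun (q : String × Int) => q.1 == p.1) hq
      have hrest'ne : ∀ q ∈ rest', q.1 ≠ p.1 := pv_drop_ne p.1 rest htail hhead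
      have hord' : rest'.Pairwise (fun a b => a.1 ≤ b.1) :=
        htail.sublist (List.dropWhile_sublist _)
      have hlen' : rest'.length ≤ n := by
        have hd := List.length_dropWhile_le (fun q => q.1 == p.1) rest
        rw [← hrest'] at hd
        have hr : rest.length ≤ n := by simpa using Nat.le_of_succ_le_succ hlen
        omega
      -- the run's Python total is exactly the per-key sum of p.1 over the whole list
      have hrunsum : pvSumFor run p.1 = run.foldl (fun s q => s + q.2) 0 := by
        unfold pvSumFor
        rw [List.filter_eq_self.mpr (fun q hq => hrunkey q hq)]
      have htot : run.foldl (fun s q => s + q.2) p.2 = pvSumFor (p :: rest) p.1 := by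
        rw [pv_foldl_shift, pv_sumFor_cons_self, hsplit, pv_sumFor_append', hrunsum,
          pv_sumFor_zero_of_all_ne rest' p.1 hrest'ne]
        ring
      have hother : ∀ r, r ≠ p.1 → pvSumFor (p :: rest) r = pvSumFor rest' r := by
        intro r hr
        rw [pv_sumFor_cons_ne p rest r (beq_eq_false_iff_ne.mpr (fun he => hr he.symm)),
          hsplit, pv_sumFor_append',
          pv_sumFor_zero_of_all_ne run r
            (fun q hq he => hr (he.symm.trans (eq_of_beq (hrunkey q hq))))]
        ring
      have hstep : pvScan av (p :: rest)
          = if run.foldl (fun s q => s + q.2) p.2 > pvAvailGet av p.1 then true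
            else pvScan av rest' := by
        rw [pvScan]
      rw [hstep]
      by_cases hcase : run.foldl (fun s q => s + q.2) p.2 > pvAvailGet av p.1
      · rw [if_pos hcase]
        simp only [true_iff]
        exact ⟨p.1, by simp, htot ▸ hcase⟩
      · rw [if_neg hcase]
        rw [ih rest' hlen' hord']
        constructor
        · rintro ⟨r, hrm, hrg⟩
          refine ⟨r, ?_, ?_⟩
          · rcases List.mem_map.mp hrm with ⟨q, hq, he⟩
            exact he ▸ List.mem_map_of_mem (by rw [hsplit]; exact List.mem_cons_of_mem p (List.mem_append_right run hq))
          · have hne : r ≠ p.1 := by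
              rcases List.mem_map.mp hrm with ⟨q, hq, he⟩
              exact he ▸ hrest'ne q hq
            rw [hother r hne]; exact hrg
        · rintro ⟨r, hrm, hrg⟩
          by_cases hr : r = p.1
          · exfalso
            rw [hr, ← htot] at hrg
            exact hcase hrg
          · refine ⟨r, ?_, by rw [← hother r hr]; exact hrg⟩
            rcases List.mem_map.mp hrm with ⟨q, hq, he⟩
            subst he
            rcases List.mem_cons.mp hq with h1 | h2
            · exact absurd (by rw [h1]) hr
            · rw [hsplit] at h2
              rcases List.mem_append.mp h2 with h3 | h4
              · exact absurd (eq_of_beq (hrunkey q h3)) hr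
              · exact List.mem_map_of_mem h4

-- ===== VERDICT (by name: the statement is the Claim_ definition above) =====
theorem simple_allocation_py_spec : Claim_equal_simple_allocation_py := by
  intro rn av _
  show simple_allocation_py rn av = simple_allocation_py_alt rn av
  unfold simple_allocation_py simple_allocation_py_alt
  rw [pv_nested_foldl]
  set ps := rn.flatMap (·.2) with hps
  set qs := PySem.List.sorted ps (fun p => p.1) false with hqs
  have hperm : qs.Perm ps := PySem.List.sorted_perm ps (fun p => p.1) false
  have hA : ((ps.foldl (fun acc p => acc.insert p.1 (acc.getD p.1 0 + p.2)) PySem.Dict.empty).items.any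
        (fun p => decide (p.2 > pvAvailGet av p.1)) = true)
      ↔ ∃ r ∈ ps.map (·.1), pvSumFor ps r > pvAvailGet av r := by
    have h := pv_items_tot ps
    unfold pvTot at h
    rw [h, List.any_map, List.any_eq_true]
    constructor
    · rintro ⟨r, hr, hg⟩
      exact ⟨r, (pv_mem_seen ps r).mp hr, by simpa using hg⟩
    · rintro ⟨r, hr, hg⟩
      exact ⟨r, (pv_mem_seen ps r).mpr hr, by simpa using hg⟩
  have hB : (pvScan av qs = true)
      ↔ ∃ r ∈ ps.map (·.1), pvSumFor ps r > pvAvailGet av r := by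
    rw [pv_scan_any av qs.length qs (le_refl _)
      (PySem.List.sorted_pairwise (xs := ps) (key := fun p => p.1))]
    constructor
    · rintro ⟨r, hr, hg⟩
      exact ⟨r, (hperm.map (·.1)).mem_iff.mp hr, by rwa [pv_sumFor_perm qs ps hperm] at hg⟩
    · rintro ⟨r, hr, hg⟩
      exact ⟨r, (hperm.map (·.1)).mem_iff.mpr hr, by rwa [pv_sumFor_perm qs ps hperm]⟩
  have hcond : ((ps.foldl (fun acc p => acc.insert p.1 (acc.getD p.1 0 + p.2)) PySem.Dict.empty).items.any
        (fun p => decide (p.2 > pvAvailGet av p.1))) = pvScan av qs := by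
    rw [Bool.eq_iff_iff, hA, hB]
  simp only [hcond]
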